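-- pv_equiv track=rewrite | github.com/zancas/tahoe-lafs | src/allmydata/scripts/tahoe_backup.py | directory_is_changed
-- ===== SOURCE A (Python) =====
-- def directory_is_changed(a, b):
--     # each is a mapping from childname to (type, cap, metadata)
--     significant_metadata = ("ctime", "mtime")
--     # other metadata keys are preserved, but changes to them won't trigger a
--     # new backup
--
--     if set(a.keys()) != set(b.keys()):
--         return True
--     for childname in a:
--         a_type, a_cap, a_metadata = a[childname]
--         b_type, b_cap, b_metadata = b[childname]
--         if a_type != b_type:
--             return True
--         if a_cap != b_cap:
--             return True
--         for k in significant_metadata: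
--             if a_metadata.get(k) != b_metadata.get(k):
--                 return True
--     return False
-- ===== SOURCE B (Python) =====
-- def directory_is_changed(a, b):
--     # each is a mapping from childname to (type, cap, metadata)
--     def normalize(d):
--         # canonical view: only the fields whose change triggers a new backup
--         return {name: (t, cap, md.get("ctime"), md.get("mtime"))
--                 for name, (t, cap, md) in d.items()}
--     return normalize(a) != normalize(b)
-- ===== Notes on version B (the rewrite author's own statement) =====
-- stated objective: simpler
-- what changed: Instead of a per-key short-circuit scan with an inner loop over significant metadata keys, B projects each mapping to a canonical dict keyed by childname with value (type, cap, ctime, mtime) and returns the result of a single dict inequality, which subsumes the key-set check and all per-child comparisons.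
import Mathlib
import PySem

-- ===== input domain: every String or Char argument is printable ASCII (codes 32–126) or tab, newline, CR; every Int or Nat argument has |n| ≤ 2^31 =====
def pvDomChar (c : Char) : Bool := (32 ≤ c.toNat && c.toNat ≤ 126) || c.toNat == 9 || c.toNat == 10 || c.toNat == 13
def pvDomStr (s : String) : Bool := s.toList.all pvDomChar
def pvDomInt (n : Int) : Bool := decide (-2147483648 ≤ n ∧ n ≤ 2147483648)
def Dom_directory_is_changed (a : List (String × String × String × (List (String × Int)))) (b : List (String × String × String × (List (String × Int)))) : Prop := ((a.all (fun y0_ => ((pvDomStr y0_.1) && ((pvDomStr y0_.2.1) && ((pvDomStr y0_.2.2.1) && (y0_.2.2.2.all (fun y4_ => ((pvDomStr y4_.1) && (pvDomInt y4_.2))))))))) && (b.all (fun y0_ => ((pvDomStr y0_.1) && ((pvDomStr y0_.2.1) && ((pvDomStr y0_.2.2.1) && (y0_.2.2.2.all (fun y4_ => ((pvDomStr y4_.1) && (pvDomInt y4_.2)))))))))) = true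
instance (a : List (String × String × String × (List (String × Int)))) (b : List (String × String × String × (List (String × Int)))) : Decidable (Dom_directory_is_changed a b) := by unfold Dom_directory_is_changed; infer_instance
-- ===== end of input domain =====

-- B replaces A's per-key short-circuit scan by building a canonical projection dict
-- (childname ↦ (type, cap, ctime, mtime)) for each side and comparing the two dicts
-- by Python dict equality; objective: simpler (one comparison instead of nested scans).

-- ===== PORT A =====
-- a[childname] / b[childname]: only reached on keys present in both, so the default is never returned
def pvLookupA (d : List (String × String × String × (List (String × Int)))) (k : String) :
    String × String × (List (String × Int)) :=
  (PySem.Dict.mk d).getD k ("", "", [])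

-- the 'for childname in a' loop with its early returns
def pvLoopA (a b : List (String × String × String × (List (String × Int)))) :
    List String → Bool
  | [] => false
  | c :: rest =>
    let pa := pvLookupA a c
    let pb := pvLookupA b c
    if pa.1 ≠ pb.1 then true
    else if pa.2.1 ≠ pb.2.1 then true
    else if (["ctime", "mtime"].any
        (fun k => (PySem.Dict.mk pa.2.2).get? k ≠ (PySem.Dict.mk pb.2.2).get? k)) then true
    else pvLoopA a b rest

def directory_is_changed (a : List (String × String × String × (List (String × Int)))) (b : List (String × String × String × (List (String × Int)))) : Bool :=
  if ¬ (PySem.Set.equal (PySem.Set.ofList ((PySem.Dict.mk a).keys))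
        (PySem.Set.ofList ((PySem.Dict.mk b).keys)) = true) then true
  else pvLoopA a b ((PySem.Dict.mk a).keys)

-- ===== PORT B =====
-- (t, cap, md.get("ctime"), md.get("mtime"))
def pvProjB (e : String × String × (List (String × Int))) :
    String × String × Option Int × Option Int :=
  (e.1, e.2.1, (PySem.Dict.mk e.2.2).get? "ctime", (PySem.Dict.mk e.2.2).get? "mtime")

-- the dict comprehension {name: (t, cap, md.get("ctime"), md.get("mtime")) for ...}
def pvNormB (d : List (String × String × String × (List (String × Int)))) :
    PySem.Dict String (String × String × Option Int × Option Int) :=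
  d.foldl (fun acc p => acc.insert p.1 (pvProjB p.2)) PySem.Dict.empty

-- Python dict '==' (order-insensitive): same size and every item of d found in e
def pvDictEqB (d e : PySem.Dict String (String × String × Option Int × Option Int)) : Bool :=
  d.size == e.size && d.items.all (fun p => e.get? p.1 == some p.2)

def directory_is_changed_alt (a : List (String × String × String × (List (String × Int)))) (b : List (String × String × String × (List (String × Int)))) : Bool :=
  ! pvDictEqB (pvNormB a) (pvNormB b)

-- ===== PRECONDITION & SPEC =====
-- Pre_ requires each association list to have pairwise-distinct keys: that is the invariant
-- of the Python dicts these lists represent (a Python dict cannot hold duplicate keys),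
-- so Pre_ excludes no input the Python function can actually receive.
def Pre_directory_is_changed (a : List (String × String × String × (List (String × Int)))) (b : List (String × String × String × (List (String × Int)))) : Prop :=
  (a.map Prod.fst).Nodup ∧ (b.map Prod.fst).Nodup
instance (a : List (String × String × String × (List (String × Int)))) (b : List (String × String × String × (List (String × Int)))) : Decidable (Pre_directory_is_changed a b) := by unfold Pre_directory_is_changed; infer_instance

def pvWitness_directory_is_changed : (List (String × String × String × (List (String × Int)))) × (List (String × String × String × (List (String × Int)))) :=
  ([("f", ("filenode", "cap1", [("ctime", 3), ("mtime", 4)]))],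
   [("f", ("filenode", "cap2", [("ctime", 3)]))])

def Spec_directory_is_changed (a : List (String × String × String × (List (String × Int)))) (b : List (String × String × String × (List (String × Int)))) (out : Bool) : Prop := out = directory_is_changed_alt a b
instance (a : List (String × String × String × (List (String × Int)))) (b : List (String × String × String × (List (String × Int)))) (out : Bool) : Decidable (Spec_directory_is_changed a b out) := by unfold Spec_directory_is_changed; infer_instance

-- ===== CLAIM (what is proved, stated in full; the proofs are below) =====
def Claim_equal_directory_is_changed : Prop := ∀ (a : List (String × String × String × (List (String × Int)))) (b : List (String × String × String × (List (String × Int)))), Dom_directory_is_changed a b → Pre_directory_is_changed a b → Spec_directory_is_changed a b (directory_is_changed a b)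

-- ===== LEMMAS AND PROOFS =====

-- items of the B-side projection dict, under distinct keys
theorem pvNormB_items (a : List (String × String × String × (List (String × Int))))
    (h : (a.map Prod.fst).Nodup) :
    (pvNormB a).items = a.map (fun p => (p.1, pvProjB p.2)) := by
  have := PySem.Dict.items_foldl_insert_fresh (l := a) (k := Prod.fst)
    (v := fun p => pvProjB p.2) (d := PySem.Dict.empty)
    (by intro x hx; simp [PySem.Dict.contains_empty]) h
  simpa [pvNormB] using this

theorem pvNormB_keys (a : List (String × String × String × (List (String × Int))))
    (h : (a.map Prod.fst).Nodup) :
    (pvNormB a).keys = a.map Prod.fst := by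
  simp [PySem.Dict.keys, pvNormB_items a h, Function.comp]

theorem pvNormB_get_mem (b : List (String × String × String × (List (String × Int))))
    (hb : (b.map Prod.fst).Nodup) (q : String × String × String × (List (String × Int)))
    (hq : q ∈ b) : (pvNormB b).get? q.1 = some (pvProjB q.2) := by
  apply PySem.Dict.get?_of_mem_items
  · rw [pvNormB_items b hb]; exact List.mem_map.mpr ⟨q, hq, rfl⟩
  · rw [pvNormB_keys b hb]; exact hb

theorem pvNormB_get_not_mem (b : List (String × String × String × (List (String × Int))))
    (hb : (b.map Prod.fst).Nodup) (k : String) (hk : k ∉ b.map Prod.fst) :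
    (pvNormB b).get? k = none := by
  rw [PySem.Dict.get?_eq_none_iff_not_mem_keys, pvNormB_keys b hb]; exact hk

theorem pvLookupA_mem (a : List (String × String × String × (List (String × Int))))
    (ha : (a.map Prod.fst).Nodup) (p : String × String × String × (List (String × Int)))
    (hp : p ∈ a) : pvLookupA a p.1 = p.2 := by
  apply PySem.Dict.getD_of_mem_items
  · exact hp
  · simpa [PySem.Dict.keys] using ha

-- the four-field branch chain of A's loop body decides inequality of B's projection tuple
theorem pvChain_eq_proj (pa pb : String × String × (List (String × Int))) (x : Bool) :
    ((if pa.1 ≠ pb.1 then true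
      else if pa.2.1 ≠ pb.2.1 then true
      else if (["ctime", "mtime"].any
          (fun k => (PySem.Dict.mk pa.2.2).get? k ≠ (PySem.Dict.mk pb.2.2).get? k)) then true
      else x) : Bool) = (decide (pvProjB pa ≠ pvProjB pb) || x) := by
  simp only [pvProjB, ne_eq, Prod.mk.injEq, List.any_cons, List.any_nil]
  by_cases h1 : pa.1 = pb.1 <;> by_cases h2 : pa.2.1 = pb.2.1 <;>
    by_cases h3 : (PySem.Dict.mk pa.2.2).get? "ctime" = (PySem.Dict.mk pb.2.2).get? "ctime" <;>
    by_cases h4 : (PySem.Dict.mk pa.2.2).get? "mtime" = (PySem.Dict.mk pb.2.2).get? "mtime" <;>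
    simp [h1, h2, h3, h4]

theorem pvLoopA_any (a b : List (String × String × String × (List (String × Int))))
    (ks : List String) :
    pvLoopA a b ks
      = ks.any (fun c => decide (pvProjB (pvLookupA a c) ≠ pvProjB (pvLookupA b c))) := by
  induction ks with
  | nil => rfl
  | cons c rest ih =>
    rw [List.any_cons, ← ih]
    exact pvChain_eq_proj (pvLookupA a c) (pvLookupA b c) (pvLoopA a b rest)

theorem directory_is_changed_spec : Claim_equal_directory_is_changed := by
  intro a b _dom hpre
  obtain ⟨ha, hb⟩ := hpre
  unfold Spec_directory_is_changed directory_is_changed directory_is_changed_alt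
  have hkeysa : (PySem.Dict.mk a).keys = a.map Prod.fst := by simp [PySem.Dict.keys]
  have hkeysb : (PySem.Dict.mk b).keys = b.map Prod.fst := by simp [PySem.Dict.keys]
  have hitemsa := pvNormB_items a ha
  have hitemsb := pvNormB_items b hb
  have hsizea : (pvNormB a).size = a.length := by simp [PySem.Dict.size, hitemsa]
  have hsizeb : (pvNormB b).size = b.length := by simp [PySem.Dict.size, hitemsb]
  by_cases hE : PySem.Set.equal (PySem.Set.ofList ((PySem.Dict.mk a).keys))
      (PySem.Set.ofList ((PySem.Dict.mk b).keys)) = true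
  · -- equal key sets
    have hmem : ∀ x, x ∈ a.map Prod.fst ↔ x ∈ b.map Prod.fst := by
      intro x
      have := (PySem.Set.equal_iff _ _).mp hE x
      simpa [PySem.Set.mem_ofList, hkeysa, hkeysb] using this
    have hperm : (a.map Prod.fst).Perm (b.map Prod.fst) :=
      (List.perm_ext_iff_of_nodup ha hb).mpr hmem
    have hlen : a.length = b.length := by simpa using hperm.length_eq
    rw [if_neg (not_not_intro hE), hkeysa, pvLoopA_any]
    have hall : (pvNormB a).items.all (fun p => (pvNormB b).get? p.1 == some p.2)
        = a.all (fun p => (pvNormB b).get? p.1 == some (pvProjB p.2)) := by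
      rw [hitemsa, List.all_map]; rfl
    rw [show pvDictEqB (pvNormB a) (pvNormB b)
        = a.all (fun p => (pvNormB b).get? p.1 == some (pvProjB p.2)) by
      simp [pvDictEqB, hsizea, hsizeb, hlen, hall]]
    rw [List.not_all_eq_any_not, List.any_map]
    apply PySem.List.any_congr_mem
    intro p hp
    obtain ⟨q, hq, hq1⟩ : ∃ q ∈ b, q.1 = p.1 := by
      have : p.1 ∈ b.map Prod.fst := (hmem p.1).mp (List.mem_map.mpr ⟨p, hp, rfl⟩)
      obtain ⟨q, hq, hq1⟩ := List.mem_map.mp this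
      exact ⟨q, hq, hq1⟩
    have hla : pvLookupA a p.1 = p.2 := pvLookupA_mem a ha p hp
    have hlb : pvLookupA b p.1 = q.2 := by rw [← hq1]; exact pvLookupA_mem b hb q hq
    have hget : (pvNormB b).get? p.1 = some (pvProjB q.2) := by
      rw [← hq1]; exact pvNormB_get_mem b hb q hq
    simp only [Function.comp, hla, hlb, hget]
    by_cases hpq : pvProjB q.2 = pvProjB p.2
    · rw [hpq]; simp
    · have h1 : decide (pvProjB p.2 ≠ pvProjB q.2) = true :=
        decide_eq_true (fun h => hpq h.symm)
      have h2 : ((some (pvProjB q.2) : Option (String × String × Option Int × Option Int))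
          == some (pvProjB p.2)) = false := beq_eq_false_iff_ne.mpr (by simpa using hpq)
      rw [h1, h2]
      rfl
  · -- different key sets: A returns True, and B's dicts cannot be equal
    rw [if_pos (by simpa using hE)]
    have hfalse : pvDictEqB (pvNormB a) (pvNormB b) = false := by
      by_contra hne
      have htrue : pvDictEqB (pvNormB a) (pvNormB b) = true := by
        cases h : pvDictEqB (pvNormB a) (pvNormB b) with
        | false => exact absurd h hne
        | true => rfl
      have hparts := htrue
      simp only [pvDictEqB, Bool.and_eq_true, beq_iff_eq] at hparts
      obtain ⟨hsz, hallb⟩ := hparts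
      have hlen : a.length = b.length := by rw [← hsizea, ← hsizeb, hsz]
      have hsub : a.map Prod.fst ⊆ b.map Prod.fst := by
        intro x hx
        obtain ⟨p, hp, hp1⟩ := List.mem_map.mp hx
        have := List.all_eq_true.mp hallb (p.1, pvProjB p.2)
          (by rw [hitemsa]; exact List.mem_map.mpr ⟨p, hp, rfl⟩)
        have hget : (pvNormB b).get? p.1 = some (pvProjB p.2) := by simpa using this
        by_contra hxb
        rw [← hp1] at hxb
        rw [pvNormB_get_not_mem b hb p.1 hxb] at hget
        simp at hget
      have hperm : (a.map Prod.fst).Perm (b.map Prod.fst) :=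
        List.Subperm.perm_of_length_le (List.subperm_of_subset ha hsub) (by simp [hlen])
      apply hE
      rw [PySem.Set.equal_iff]
      intro x
      simp only [PySem.Set.mem_ofList, hkeysa, hkeysb]
      exact hperm.mem_iff
    simp [hfalse]
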